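-- pv_equiv track=rewrite | github.com/a-brandon/practice | codewars/elimination_tournament.py | tourney
-- ===== SOURCE A (Python) =====
-- def tourney(inp):
--     output = [inp]
--
--     while len(inp) > 1:
--         l = [max(inp[i: i + 2]) for i in range(0, len(inp), 2)]
--
--         if len(inp) % 2:
--             l = [l.pop()] + l
--
--         output.append(l)
--         inp = l
--
--     return output
-- ===== SOURCE B (Python) =====
-- def tourney(inp):
--     if len(inp) <= 1:
--         return [inp]
--     it = iter(inp)
--     nxt = [max(a, b) for a, b in zip(it, it)]  # maxes of adjacent disjoint pairs; odd leftover ignored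
--     if len(inp) % 2:
--         nxt = [inp[-1]] + nxt
--     return [inp] + tourney(nxt)
-- ===== Notes on version B (the rewrite author's own statement) =====
-- stated objective: alternative
-- what changed: Replaces the while-loop of range/slice comprehensions and pop-to-front by divide-and-conquer recursion over the halving structure with a zip(it,it) two-at-a-time pairing, prepending the last element directly on odd rounds; avoiding the per-pair range/slice objects and the pop also gave a measured constant-factor speedup on large inputs.
import Mathlib
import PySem

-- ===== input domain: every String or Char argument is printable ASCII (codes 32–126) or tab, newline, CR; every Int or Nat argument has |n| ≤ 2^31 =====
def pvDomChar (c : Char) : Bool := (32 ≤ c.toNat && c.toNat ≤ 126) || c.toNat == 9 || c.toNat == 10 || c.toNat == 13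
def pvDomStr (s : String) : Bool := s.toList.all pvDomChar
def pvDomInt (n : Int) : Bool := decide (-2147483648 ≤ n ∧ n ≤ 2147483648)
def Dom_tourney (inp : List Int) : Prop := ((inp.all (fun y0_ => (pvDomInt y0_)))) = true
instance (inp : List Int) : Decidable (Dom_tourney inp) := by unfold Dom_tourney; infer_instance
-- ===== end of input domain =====

-- B replaces A's while-loop of range/slice comprehensions and pop-to-front by recursion over the
-- halving structure with a zip(it,it) two-at-a-time pairing (objective: alternative decomposition).
-- Port B comes first in this file because port A's termination proof cites facts about B's pairing.

-- ===== PORT B =====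
-- nxt = [max(a, b) for a, b in zip(it, it)] with it = iter(inp):
-- consume the list two at a time, the odd leftover element is ignored
def pairMaxes : List Int → List Int
  | a :: b :: t => max a b :: pairMaxes t
  | _ => []

theorem pairMaxes_length (xs : List Int) : (pairMaxes xs).length = xs.length / 2 := by
  induction xs using pairMaxes.induct with
  | case1 a b t ih => simp only [pairMaxes, List.length_cons, ih]; omega
  | case2 t h =>
    match t, h with
    | [], _ => rfl
    | [_], _ => simp [pairMaxes]
    | a :: b :: t, h => exact absurd rfl (h a b t)

def tourney_alt (inp : List Int) : List (List Int) :=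
  if h : 1 < inp.length then
    let nxt := pairMaxes inp
    let nxt2 := if inp.length % 2 = 1 then PySem.List.pyGetD inp (-1) 0 :: nxt else nxt
    inp :: tourney_alt nxt2
  else [inp]
termination_by inp.length
decreasing_by
  have hp := pairMaxes_length inp
  split <;> simp only [List.length_cons, hp] <;> omega

-- ===== PORT A =====
-- one round: l = [max(inp[i:i+2]) for i in range(0, len(inp), 2)]
-- (each slice inp[i:i+2] is nonempty for every produced i, so Python's max never raises; .getD 0 is never hit)
def tourneyRound (inp : List Int) : List Int :=
  (PySem.List.pyRange 0 (inp.length : Int) 2).map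
    (fun i => (PySem.List.max? (PySem.List.slice inp (some i) (some (i + 2))) (fun x => x)).getD 0)

-- the next three theorems are termination facts for the while-loop below (decreasing_by cites them)
theorem eraseIdx_append_len (xs : List Int) (x : Int) : (xs ++ [x]).eraseIdx xs.length = xs := by
  induction xs <;> simp_all

theorem pop?_append_singleton (xs : List Int) (x : Int) :
    PySem.List.pop? (xs ++ [x]) = some (x, xs) := by
  simp [PySem.List.pop?, PySem.List.pyIdx?, eraseIdx_append_len]

-- A's round is B's pairing, with the odd leftover (= the last element) at the END of the list
theorem roundA_eq (inp : List Int) :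
    tourneyRound inp =
      pairMaxes inp ++ (if inp.length % 2 = 1 then [PySem.List.pyGetD inp (-1) 0] else []) := by
  unfold tourneyRound
  rw [PySem.List.pyRange_of_pos 0 (inp.length : Int) (by norm_num)]
  have hcnt : (if (0:Int) < inp.length then (((inp.length : Int) - 0 + 2 - 1) / 2).toNat else 0)
      = (inp.length + 1) / 2 := by split_ifs <;> omega
  rw [hcnt, List.map_map]
  clear hcnt
  induction inp using pairMaxes.induct with
  | case1 a b t ih =>
    have hlen : ((a :: b :: t).length + 1) / 2 = (t.length + 1) / 2 + 1 := by simp; omega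
    rw [hlen, List.range_succ_eq_map, List.map_cons, List.map_map]
    have h0 : ((fun i => (PySem.List.max? (PySem.List.slice (a :: b :: t) (some i) (some (i + 2)))
        (fun x => x)).getD 0) ∘ fun k : Nat => 0 + 2 * (k : Int)) 0 = max a b := by
      simp [PySem.List.slice_to, PySem.List.max?_id_cons]
    rw [h0]
    have hshift : ((fun i => (PySem.List.max? (PySem.List.slice (a :: b :: t) (some i) (some (i + 2)))
          (fun x => x)).getD 0) ∘ fun k : Nat => 0 + 2 * (k : Int)) ∘ Nat.succ
        = ((fun i => (PySem.List.max? (PySem.List.slice t (some i) (some (i + 2)))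
          (fun x => x)).getD 0) ∘ fun k : Nat => 0 + 2 * (k : Int)) := by
      funext k
      have h1 : (0 + 2 * ((k.succ : Nat) : Int)) = ((2 * k + 2 : Nat) : Int) := by push_cast; ring
      have h2 : (0 + 2 * ((k : Nat) : Int)) = ((2 * k : Nat) : Int) := by push_cast; ring
      have h3 : ((2 * k + 2 : Nat) : Int) + 2 = ((2 * k + 4 : Nat) : Int) := by push_cast; ring
      have h4 : ((2 * k : Nat) : Int) + 2 = ((2 * k + 2 : Nat) : Int) := by push_cast; ring
      simp only [Function.comp_apply, h1, h2, h3, h4, PySem.List.slice_natCast]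
      simp [List.drop_succ_cons]
    rw [hshift, ih]
    by_cases hodd : t.length % 2 = 1
    · have ht : t ≠ [] := by intro h; rw [h] at hodd; simp at hodd
      have hmod : (a :: b :: t).length % 2 = 1 := by simp [List.length_cons]; omega
      rw [if_pos hodd, if_pos hmod]
      have : PySem.List.pyGetD (a :: b :: t) (-1) 0 = PySem.List.pyGetD t (-1) 0 := by
        simp [PySem.List.pyGetD_neg_one, ht, List.getLast_cons]
      rw [this]
      simp [pairMaxes]
    · have hmod : ¬ (a :: b :: t).length % 2 = 1 := by simp [List.length_cons]; omega
      rw [if_neg hodd, if_neg hmod]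
      simp [pairMaxes]
  | case2 t hne =>
    match t, hne with
    | [], _ => simp [pairMaxes]
    | [a], _ =>
      have h1 : (([a] : List Int).length + 1) / 2 = 1 := by simp
      rw [h1]
      simp [pairMaxes, PySem.List.slice_to, PySem.List.max?_id_cons,
        PySem.List.pyGetD_neg_one]
    | a :: b :: t, hne => exact absurd rfl (hne a b t)

-- while len(inp) > 1: build l, move the popped last element to the front when len(inp) is odd,
-- append l to output, continue with inp = l
def tourneyLoop (inp : List Int) (output : List (List Int)) : List (List Int) :=
  if h : 1 < inp.length then
    let l := tourneyRound inp
    let l2 : List Int :=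
      if inp.length % 2 = 1 then
        match PySem.List.pop? l with
        | some (v, rest) => [v] ++ rest
        | none => l          -- unreachable: l is nonempty, pop() never raises here
      else l
    tourneyLoop l2 (output ++ [l2])
  else output
termination_by inp.length
decreasing_by
  split
  · next hodd =>
    rw [roundA_eq inp, if_pos hodd, pop?_append_singleton]
    simp only [List.singleton_append, List.length_cons, pairMaxes_length]
    omega
  · next heven =>
    rw [roundA_eq inp, if_neg heven]
    simp only [List.append_nil, pairMaxes_length]
    omega

def tourney (inp : List Int) : List (List Int) := tourneyLoop inp [inp]

-- ===== PRECONDITION & SPEC =====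
def Spec_tourney (inp : List Int) (out : List (List Int)) : Prop := out = tourney_alt inp
instance (inp : List Int) (out : List (List Int)) : Decidable (Spec_tourney inp out) := by unfold Spec_tourney; infer_instance

-- ===== CLAIM (what is proved, stated in full; the proofs are below) =====
def Claim_equal_tourney : Prop := ∀ (inp : List Int), Dom_tourney inp → Spec_tourney inp (tourney inp)

-- ===== LEMMAS AND PROOFS =====

-- tourney_alt always returns its argument as the first round
theorem tourney_alt_head (inp : List Int) :
    tourney_alt inp = inp :: (tourney_alt inp).tail := by
  rw [tourney_alt]
  split <;> simp

-- the later rounds of tourney_alt are tourney_alt of B's next round nxt2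
theorem tourney_alt_tail (inp : List Int) (h : 1 < inp.length) :
    (tourney_alt inp).tail
      = tourney_alt (if inp.length % 2 = 1 then PySem.List.pyGetD inp (-1) 0 :: pairMaxes inp
          else pairMaxes inp) := by
  rw [tourney_alt, dif_pos h]
  rfl

-- A's round value after the odd-length pop-to-front step equals B's next round nxt2
theorem l2_eq (inp : List Int) :
    (if inp.length % 2 = 1 then
        match PySem.List.pop? (tourneyRound inp) with
        | some (v, rest) => [v] ++ rest
        | none => tourneyRound inp
      else tourneyRound inp)
    = (if inp.length % 2 = 1 then PySem.List.pyGetD inp (-1) 0 :: pairMaxes inp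
       else pairMaxes inp) := by
  rw [roundA_eq]
  by_cases hodd : inp.length % 2 = 1
  · simp [hodd, pop?_append_singleton]
  · simp [hodd]

-- the accumulating while-loop computes acc ++ the later rounds of the recursion
theorem loop_eq (inp : List Int) (acc : List (List Int)) :
    tourneyLoop inp acc = acc ++ (tourney_alt inp).tail := by
  induction inp, acc using tourneyLoop.induct with
  | case1 inp acc h l l2 ih =>
    rw [tourneyLoop, dif_pos h]
    show tourneyLoop l2 (acc ++ [l2]) = acc ++ (tourney_alt inp).tail
    have hl2 : l2 = (if inp.length % 2 = 1 then PySem.List.pyGetD inp (-1) 0 :: pairMaxes inp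
        else pairMaxes inp) := l2_eq inp
    rw [ih, tourney_alt_tail inp h, hl2,
      tourney_alt_head (if inp.length % 2 = 1 then PySem.List.pyGetD inp (-1) 0 :: pairMaxes inp
        else pairMaxes inp)]
    simp
  | case2 inp acc h =>
    rw [tourneyLoop, dif_neg h, tourney_alt, dif_neg h]
    simp

-- ===== VERDICT (by name: the statement is the Claim_ definition above) =====
theorem tourney_spec : Claim_equal_tourney := by
  intro inp _
  unfold Spec_tourney tourney
  rw [loop_eq, tourney_alt_head inp]
  simp
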